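-- pv_equiv track=rewrite | github.com/NikoLaFerrari/huawei_paris | memory_estimation/comparators/mem_block_parser.py | get_peak
-- ===== SOURCE A (Python) =====
-- def get_peak(memory_changes, need_cumlate=True):
--     """search for peak time and memory"""
--     if not memory_changes:
--         return
--     sorted_times = sorted(memory_changes.keys())
--     cumulative_memory = 0
--     times = []
--     memory_usage = []
--
--     for time in sorted_times:
--         if need_cumlate:
--             cumulative_memory += memory_changes[time]
--             times.append(time)
--             memory_usage.append(cumulative_memory)
--         else:
--             times.append(time)
--             memory_usage.append(memory_changes[time])
--
--     max_index = memory_usage.index(max(memory_usage))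
--     peak_time = times[max_index]
--     peak_memory_usage = memory_usage[max_index]
--     return peak_time, peak_memory_usage
-- ===== SOURCE B (Python) =====
-- def get_peak(memory_changes, need_cumlate=True):
--     """search for peak time and memory (single pass, no parallel lists)"""
--     if not memory_changes:
--         return
--     cumulative = 0
--     peak_time = peak_memory_usage = None
--     for time in sorted(memory_changes):
--         delta = memory_changes[time]
--         usage = cumulative + delta if need_cumlate else delta
--         if need_cumlate:
--             cumulative = usage
--         if peak_memory_usage is None or usage > peak_memory_usage:
--             peak_time, peak_memory_usage = time, usage
--     return peak_time, peak_memory_usage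
-- ===== Notes on version B (the rewrite author's own statement) =====
-- stated objective: simpler
-- what changed: B replaces A's two parallel lists and the separate max()/index()/indexing scans with a single pass over the sorted times that maintains the cumulative usage and the earliest strict-maximum peak (peak_time, peak_memory_usage) directly.
import Mathlib
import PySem

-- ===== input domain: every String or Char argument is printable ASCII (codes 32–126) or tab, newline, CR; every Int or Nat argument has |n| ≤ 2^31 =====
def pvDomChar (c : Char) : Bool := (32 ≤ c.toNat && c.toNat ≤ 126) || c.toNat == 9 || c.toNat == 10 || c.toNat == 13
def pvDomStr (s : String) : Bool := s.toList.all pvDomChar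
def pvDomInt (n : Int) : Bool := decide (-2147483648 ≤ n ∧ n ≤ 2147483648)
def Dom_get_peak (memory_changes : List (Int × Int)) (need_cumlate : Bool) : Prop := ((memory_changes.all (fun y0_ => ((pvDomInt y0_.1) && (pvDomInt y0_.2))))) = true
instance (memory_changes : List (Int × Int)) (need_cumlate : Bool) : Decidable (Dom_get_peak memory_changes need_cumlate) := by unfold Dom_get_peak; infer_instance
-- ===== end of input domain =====

-- B fuses A's build-two-lists-then-max()/index() pipeline into one pass over the sorted
-- times keeping the cumulative usage and the earliest strict-maximum peak (objective: simpler).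


-- ===== PORT A =====
def get_peak (memory_changes : List (Int × Int)) (need_cumlate : Bool) : Option (Int × Int) :=
  if memory_changes = [] then none
  else
    let d := PySem.Dict.mk memory_changes
    let sorted_times := PySem.List.sorted d.keys (fun x => x) false
    -- the loop: cumulative_memory, times, memory_usage
    let st := sorted_times.foldl
      (fun (s : Int × List Int × List Int) time =>
        if need_cumlate then
          (s.1 + d.getD time 0, s.2.1 ++ [time], s.2.2 ++ [s.1 + d.getD time 0])
        else
          (s.1, s.2.1 ++ [time], s.2.2 ++ [d.getD time 0]))
      (0, [], [])
    let times := st.2.1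
    let memory_usage := st.2.2
    match PySem.List.max? memory_usage (fun x => x) with
    | none => none   -- unreachable: memory_usage is nonempty (Python max([]) would raise)
    | some m =>
      match PySem.List.index? memory_usage m with
      | none => none   -- unreachable: m ∈ memory_usage
      | some i => some (times.getD i 0, memory_usage.getD i 0)

-- ===== PORT B =====
def get_peak_alt (memory_changes : List (Int × Int)) (need_cumlate : Bool) : Option (Int × Int) :=
  if memory_changes = [] then none
  else
    let d := PySem.Dict.mk memory_changes
    let st := (PySem.List.sorted d.keys (fun x => x) false).foldl
      (fun (s : Int × Option (Int × Int)) time =>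
        let delta := d.getD time 0
        let usage := if need_cumlate then s.1 + delta else delta
        let cum := if need_cumlate then usage else s.1
        match s.2 with
        | none => (cum, some (time, usage))
        | some (pt, pm) => (cum, if usage > pm then some (time, usage) else some (pt, pm)))
      (0, none)
    st.2

-- ===== PRECONDITION & SPEC =====
def Spec_get_peak (memory_changes : List (Int × Int)) (need_cumlate : Bool) (out : Option (Int × Int)) : Prop := out = get_peak_alt memory_changes need_cumlate
instance (memory_changes : List (Int × Int)) (need_cumlate : Bool) (out : Option (Int × Int)) : Decidable (Spec_get_peak memory_changes need_cumlate out) := by unfold Spec_get_peak; infer_instance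

-- ===== CLAIM (what is proved, stated in full; the proofs are below) =====
def Claim_equal_get_peak : Prop := ∀ (memory_changes : List (Int × Int)) (need_cumlate : Bool), Dom_get_peak memory_changes need_cumlate → Spec_get_peak memory_changes need_cumlate (get_peak memory_changes need_cumlate)

-- ===== LEMMAS AND PROOFS =====

-- the (time, usage) pairs both loops walk through, in order
def pvPairs (d : PySem.Dict Int Int) (nc : Bool) : List Int → Int → List (Int × Int)
  | [], _ => []
  | t :: ks, c =>
    let delta := d.getD t 0
    let u := if nc then c + delta else delta
    (t, u) :: pvPairs d nc ks (if nc then u else c)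

-- B's best-so-far step
def pvStep (b p : Int × Int) : Int × Int := if p.2 > b.2 then p else b

-- A's loop builds exactly the fst/snd projections of pvPairs
theorem pvA_fold (d : PySem.Dict Int Int) (nc : Bool) (ks : List Int) :
    ∀ (c : Int) (ts ms : List Int),
    (ks.foldl
      (fun (s : Int × List Int × List Int) time =>
        if nc then
          (s.1 + d.getD time 0, s.2.1 ++ [time], s.2.2 ++ [s.1 + d.getD time 0])
        else
          (s.1, s.2.1 ++ [time], s.2.2 ++ [d.getD time 0]))
      (c, ts, ms)).2
    = (ts ++ (pvPairs d nc ks c).map (·.1), ms ++ (pvPairs d nc ks c).map (·.2)) := by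
  induction ks with
  | nil => intro c ts ms; simp [pvPairs]
  | cons t ks ih =>
    intro c ts ms
    by_cases h : nc = true
    · subst h
      simpa [pvPairs, List.append_assoc] using ih (c + d.getD t 0) (ts ++ [t]) (ms ++ [c + d.getD t 0])
    · simp only [Bool.not_eq_true] at h; subst h
      simpa [pvPairs, List.append_assoc] using ih c (ts ++ [t]) (ms ++ [d.getD t 0])

-- B's loop is a pvStep-fold over pvPairs
theorem pvB_fold (d : PySem.Dict Int Int) (nc : Bool) (ks : List Int) :
    ∀ (c : Int) (b : Int × Int),
    (ks.foldl
      (fun (s : Int × Option (Int × Int)) time =>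
        let delta := d.getD time 0
        let usage := if nc then s.1 + delta else delta
        let cum := if nc then usage else s.1
        match s.2 with
        | none => (cum, some (time, usage))
        | some (pt, pm) => (cum, if usage > pm then some (time, usage) else some (pt, pm)))
      (c, some b)).2
    = some ((pvPairs d nc ks c).foldl pvStep b) := by
  induction ks with
  | nil => intro c b; simp [pvPairs]
  | cons t ks ih =>
    intro c b
    obtain ⟨bt, bm⟩ := b
    by_cases hgt : (if nc then c + d.getD t 0 else d.getD t 0) > bm
    · simpa [pvPairs, pvStep, hgt] using ih (if nc then (if nc then c + d.getD t 0 else d.getD t 0) else c) _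
    · simpa [pvPairs, pvStep, hgt] using ih (if nc then (if nc then c + d.getD t 0 else d.getD t 0) else c) _

-- the fold result is an element whose usage is maximal, with all earlier usages strictly smaller
theorem pvFold_char (ps : List (Int × Int)) : ∀ (b : Int × Int),
    ∃ k, ∃ hk : k < (b :: ps).length,
      ps.foldl pvStep b = (b :: ps)[k] ∧
      (∀ j (hj : j < (b :: ps).length), (b :: ps)[j].2 ≤ (b :: ps)[k].2) ∧
      (∀ j (hj : j < k), ((b :: ps)[j]'(Nat.lt_trans hj hk)).2 < (b :: ps)[k].2) := by
  induction ps with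
  | nil =>
    intro b
    refine ⟨0, by simp, by simp, ?_, by omega⟩
    intro j hj
    match j with
    | 0 => simp
  | cons p rest ih =>
    intro b
    obtain ⟨k, hk, heq, hmax, hstrict⟩ := ih (pvStep b p)
    by_cases h : p.2 > b.2
    · -- pvStep b p = p : shift everything by one
      refine ⟨k + 1, by simpa using hk, ?_, ?_, ?_⟩
      · simpa [pvStep, h] using heq
      · intro j hj
        match j with
        | 0 =>
          have := hmax 0 (by simp)
          simp only [List.getElem_cons_zero] at this ⊢
          simp only [List.getElem_cons_succ]
          calc b.2 ≤ p.2 := le_of_lt h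
            _ ≤ _ := by simpa [pvStep, h] using this
        | j + 1 =>
          have := hmax j (by simpa using hj)
          simpa [pvStep, h] using this
      · intro j hj
        match j with
        | 0 =>
          have := hmax 0 (by simp)
          simp only [List.getElem_cons_zero, List.getElem_cons_succ] at this ⊢
          calc b.2 < p.2 := h
            _ ≤ _ := by simpa [pvStep, h] using this
        | j + 1 =>
          have := hstrict j (by omega)
          simpa [pvStep, h] using this
    · -- pvStep b p = b : k = 0 stays, k = j+1 shifts past p
      have hpb : p.2 ≤ b.2 := by omega
      match k, hk with
      | 0, hk =>
        refine ⟨0, by simp, ?_, ?_, ?_⟩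
        · simpa [pvStep, h] using heq
        · intro j hj
          match j with
          | 0 => simp
          | 1 => simpa using hpb
          | j + 2 =>
            have := hmax (j + 1) (by simpa using hj)
            simpa [pvStep, h] using this
        · intro j hj; omega
      | k + 1, hk =>
        have hb_lt : b.2 < ((pvStep b p :: rest)[k + 1]'hk).2 := by
          have := hstrict 0 (by omega)
          simpa [pvStep, h] using this
        refine ⟨k + 2, by simpa using hk, ?_, ?_, ?_⟩
        · simpa [pvStep, h] using heq
        · intro j hj
          match j with
          | 0 =>
            have := hmax 0 (by simp)
            simpa [pvStep, h] using this
          | 1 =>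
            simp only [List.getElem_cons_succ, List.getElem_cons_zero]
            exact le_trans hpb (le_of_lt (by simpa [pvStep, h] using hb_lt))
          | j + 2 =>
            have := hmax (j + 1) (by simpa using hj)
            simpa [pvStep, h] using this
        · intro j hj
          match j with
          | 0 => simpa [pvStep, h] using hb_lt
          | 1 =>
            simp only [List.getElem_cons_succ, List.getElem_cons_zero]
            exact lt_of_le_of_lt hpb (by simpa [pvStep, h] using hb_lt)
          | j + 2 =>
            have := hstrict (j + 1) (by omega)
            simpa [pvStep, h] using this

-- A's max()/index()/indexing extraction chain returns exactly B's fold result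
theorem pvExtract (ps : List (Int × Int)) (b : Int × Int) :
    (match PySem.List.max? ((b :: ps).map (·.2)) (fun x => x) with
     | none => none
     | some m =>
       match PySem.List.index? ((b :: ps).map (·.2)) m with
       | none => none
       | some i => some ((((b :: ps).map (·.1)).getD i 0, ((b :: ps).map (·.2)).getD i 0)))
    = some (ps.foldl pvStep b) := by
  obtain ⟨k, hk, heq, hmax, hstrict⟩ := pvFold_char ps b
  have hkm : k < ((b :: ps).map (·.2)).length := by simpa using hk
  obtain ⟨m, hm⟩ : ∃ m, PySem.List.max? ((b :: ps).map (·.2)) (fun x => x) = some m := by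
    cases hmm : PySem.List.max? ((b :: ps).map (·.2)) (fun x => x) with
    | none =>
      exact absurd ((PySem.List.max?_eq_none_iff _ _).mp hmm) (by simp)
    | some m => exact ⟨m, rfl⟩
  have hm_mem : m ∈ (b :: ps).map (·.2) := PySem.List.max?_mem hm
  have hub : ∀ y ∈ (b :: ps).map (·.2), y ≤ m := by
    intro y hy; simpa using PySem.List.max?_isMax hm y hy
  have hmk : ((b :: ps).map (·.2))[k]'hkm = m := by
    obtain ⟨j0, hj0, hj0e⟩ := List.mem_iff_getElem.mp hm_mem
    have h1 : m ≤ ((b :: ps).map (·.2))[k]'hkm := by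
      rw [← hj0e]
      simp only [List.getElem_map]
      exact hmax j0 (by simpa using hj0)
    have h2 : ((b :: ps).map (·.2))[k]'hkm ≤ m := hub _ (List.getElem_mem hkm)
    omega
  obtain ⟨i, hi⟩ : ∃ i, PySem.List.index? ((b :: ps).map (·.2)) m = some i := by
    cases hii : PySem.List.index? ((b :: ps).map (·.2)) m with
    | none => exact absurd ((PySem.List.index?_eq_none_iff _ _).mp hii) (not_not_intro hm_mem)
    | some i => exact ⟨i, rfl⟩
  obtain ⟨hilt, hie, hifst⟩ := PySem.List.getElem_of_index?_eq_some hi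
  have hik : i = k := by
    rcases Nat.lt_trichotomy i k with hlt | heqk | hgt
    · exfalso
      have hs := hstrict i hlt
      have e1 : ((b :: ps).map (·.2))[i]'hilt = ((b :: ps)[i]'(Nat.lt_trans hlt hk)).2 := by
        simp only [List.getElem_map]
      have e2 : ((b :: ps).map (·.2))[k]'hkm = ((b :: ps)[k]'hk).2 := by
        simp only [List.getElem_map]
      rw [e1] at hie; rw [e2] at hmk
      omega
    · exact heqk
    · exact absurd hmk (hifst k hgt)
  subst hik
  simp only [hm, hi]
  have h1 : ((b :: ps).map (·.1)).getD i 0 = ((b :: ps)[i]'hk).1 := by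
    rw [List.getD_eq_getElem _ _ (by simpa using hk)]
    simp only [List.getElem_map]
  have h2 : ((b :: ps).map (·.2)).getD i 0 = ((b :: ps)[i]'hk).2 := by
    rw [List.getD_eq_getElem _ _ hkm]
    simp only [List.getElem_map]
  rw [heq, h1, h2]

-- B's full loop from the initial (0, none) state
theorem pvB_fold0 (d : PySem.Dict Int Int) (nc : Bool) (k0 : Int) (ks' : List Int) (c : Int) :
    ((k0 :: ks').foldl
      (fun (s : Int × Option (Int × Int)) time =>
        let delta := d.getD time 0
        let usage := if nc then s.1 + delta else delta
        let cum := if nc then usage else s.1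
        match s.2 with
        | none => (cum, some (time, usage))
        | some (pt, pm) => (cum, if usage > pm then some (time, usage) else some (pt, pm)))
      (c, none)).2
    = some ((pvPairs d nc ks'
        (if nc then (if nc then c + d.getD k0 0 else d.getD k0 0) else c)).foldl pvStep
        (k0, if nc then c + d.getD k0 0 else d.getD k0 0)) := by
  rw [List.foldl_cons]
  exact pvB_fold d nc ks' _ _

-- ===== VERDICT (by name: the statement is the Claim_ definition above) =====
theorem get_peak_spec : Claim_equal_get_peak := by
  intro mc nc _
  unfold Spec_get_peak
  by_cases hmc : mc = []
  · simp [get_peak, get_peak_alt, hmc]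
  · have hs : PySem.List.sorted (PySem.Dict.mk mc).keys (fun x => x) false ≠ [] := by
      rw [Ne, PySem.List.sorted_eq_nil_iff]
      simp [hmc]
    cases hks : PySem.List.sorted (PySem.Dict.mk mc).keys (fun x => x) false with
    | nil => exact absurd hks hs
    | cons k0 ks' =>
      simp only [get_peak, get_peak_alt, if_neg hmc, hks]
      rw [pvA_fold (PySem.Dict.mk mc) nc (k0 :: ks') 0 [] []]
      rw [pvB_fold0 (PySem.Dict.mk mc) nc k0 ks' 0]
      simp only [pvPairs, List.nil_append]
      exact pvExtract _ _
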